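-- pv_equiv track=rewrite | github.com/j3claw-bot/management-portal | kita/engine/scheduler.py | _would_exceed_consecutive
-- ===== SOURCE A (Python) =====
-- def _would_exceed_consecutive(emp_id: int, weekday: int,
--                                days_assigned: dict[int, list[int]],
--                                max_consecutive: int) -> bool:
--     """Check if assigning emp to weekday would exceed max consecutive days."""
--     assigned_days = set(days_assigned.get(emp_id, []))
--     assigned_days.add(weekday)
--
--     # Find the longest run of consecutive days in the assigned set
--     if not assigned_days:
--         return False
--
--     sorted_days = sorted(assigned_days)
--     max_run = 1
--     current_run = 1
--     for i in range(1, len(sorted_days)):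
--         if sorted_days[i] == sorted_days[i - 1] + 1:
--             current_run += 1
--             max_run = max(max_run, current_run)
--         else:
--             current_run = 1
--
--     return max_run > max_consecutive
-- ===== SOURCE B (Python) =====
-- def _would_exceed_consecutive(emp_id: int, weekday: int,
--                                days_assigned: dict[int, list[int]],
--                                max_consecutive: int) -> bool:
--     """Exceeds iff some run of max_consecutive+1 consecutive days exists in the set."""
--     days = set(days_assigned.get(emp_id, []))
--     days.add(weekday)
--     if max_consecutive >= len(days):
--         return False  # a run cannot be longer than the whole set
--     return any(all(d + k in days for k in range(1, max_consecutive + 1))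
--                for d in days)
-- ===== Notes on version B (the rewrite author's own statement) =====
-- stated objective: alternative
-- what changed: B drops the sort and the max-run/current-run scan entirely: it checks directly whether some day d in the set starts a run of max_consecutive+1 consecutive members via set membership (any/all over range), which is equivalent to 'longest run > max_consecutive'.
import Mathlib
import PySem

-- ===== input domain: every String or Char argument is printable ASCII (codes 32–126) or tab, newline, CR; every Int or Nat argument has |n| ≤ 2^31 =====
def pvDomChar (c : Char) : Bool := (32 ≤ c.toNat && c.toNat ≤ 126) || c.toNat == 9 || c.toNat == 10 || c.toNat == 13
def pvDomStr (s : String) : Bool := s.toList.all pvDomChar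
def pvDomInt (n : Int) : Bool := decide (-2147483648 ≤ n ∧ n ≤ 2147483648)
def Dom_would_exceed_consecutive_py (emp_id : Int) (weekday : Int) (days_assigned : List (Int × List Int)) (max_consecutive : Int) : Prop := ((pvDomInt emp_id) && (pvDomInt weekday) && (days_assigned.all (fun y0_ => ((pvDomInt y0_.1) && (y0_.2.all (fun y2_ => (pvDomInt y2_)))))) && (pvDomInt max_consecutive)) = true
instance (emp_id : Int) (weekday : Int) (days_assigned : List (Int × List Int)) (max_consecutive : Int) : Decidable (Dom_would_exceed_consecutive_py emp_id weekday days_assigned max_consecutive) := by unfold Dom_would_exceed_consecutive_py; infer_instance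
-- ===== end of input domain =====

-- B replaces A's sort + max-run/current-run pairwise scan by a direct membership test:
-- some day d starts a run of max_consecutive+1 consecutive set members (alternative, same behaviour).

-- ===== PORT A =====
def would_exceed_consecutive_py (emp_id : Int) (weekday : Int) (days_assigned : List (Int × List Int)) (max_consecutive : Int) : Bool :=
  let assigned_days := PySem.Set.add (PySem.Set.ofList (PySem.Dict.getD (PySem.Dict.mk days_assigned) emp_id [])) weekday
  if assigned_days.isEmpty then false
  else
    let sorted_days := PySem.List.sorted assigned_days (fun x => x) false
    let st := (PySem.List.pyRange 1 (sorted_days.length : Int) 1).foldl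
      (fun (st : Int × Int) i =>
        if PySem.List.pyGetD sorted_days i 0 = PySem.List.pyGetD sorted_days (i - 1) 0 + 1 then
          (max st.1 (st.2 + 1), st.2 + 1)
        else (st.1, 1)) (1, 1)
    decide (st.1 > max_consecutive)

-- ===== PORT B =====
def would_exceed_consecutive_py_alt (emp_id : Int) (weekday : Int) (days_assigned : List (Int × List Int)) (max_consecutive : Int) : Bool :=
  let days := PySem.Set.add (PySem.Set.ofList (PySem.Dict.getD (PySem.Dict.mk days_assigned) emp_id [])) weekday
  if PySem.Set.len days ≤ max_consecutive then false
  else days.any (fun d => (PySem.List.pyRange 1 (max_consecutive + 1) 1).all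
    (fun k => PySem.Set.contains days (d + k)))

-- ===== PRECONDITION & SPEC =====
def Spec_would_exceed_consecutive_py (emp_id : Int) (weekday : Int) (days_assigned : List (Int × List Int)) (max_consecutive : Int) (out : Bool) : Prop := out = would_exceed_consecutive_py_alt emp_id weekday days_assigned max_consecutive
instance (emp_id : Int) (weekday : Int) (days_assigned : List (Int × List Int)) (max_consecutive : Int) (out : Bool) : Decidable (Spec_would_exceed_consecutive_py emp_id weekday days_assigned max_consecutive out) := by unfold Spec_would_exceed_consecutive_py; infer_instance

-- ===== CLAIM (what is proved, stated in full; the proofs are below) =====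
def Claim_equal_would_exceed_consecutive_py : Prop := ∀ (emp_id : Int) (weekday : Int) (days_assigned : List (Int × List Int)) (max_consecutive : Int), Dom_would_exceed_consecutive_py emp_id weekday days_assigned max_consecutive → Spec_would_exceed_consecutive_py emp_id weekday days_assigned max_consecutive (would_exceed_consecutive_py emp_id weekday days_assigned max_consecutive)

-- ===== LEMMAS AND PROOFS =====

-- Structural form of A's loop: the previous sorted element carried explicitly.
def pvScan (p : Int) (t : List Int) (st : Int × Int) : Int × Int :=
  match t with
  | [] => st
  | x :: xs => pvScan x xs (if x = p + 1 then (max st.1 (st.2 + 1), st.2 + 1) else (st.1, 1))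

theorem pvScan_fst_ge (p : Int) (t : List Int) (st : Int × Int) : st.1 ≤ (pvScan p t st).1 := by
  induction t generalizing p st with
  | nil => simp [pvScan]
  | cons x xs ih =>
    simp only [pvScan]
    refine le_trans ?_ (ih x _)
    split <;> simp

theorem pvScan_fst_le (p : Int) (t : List Int) (M c : Int) (hc1 : 1 ≤ c) :
    (pvScan p t (M, c)).1 ≤ max M (c + (t.length : Int)) := by
  induction t generalizing p M c with
  | nil => simp [pvScan]
  | cons x xs ih =>
    simp only [pvScan]
    by_cases hx : x = p + 1
    · rw [if_pos hx]
      refine le_trans (ih x (max M (c + 1)) (c + 1) (by omega)) ?_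
      apply max_le
      · apply max_le (le_max_left _ _)
        apply le_max_of_le_right
        simp only [List.length_cons]
        push_cast; omega
      · apply le_max_of_le_right
        simp only [List.length_cons]
        push_cast; omega
    · rw [if_neg hx]
      refine le_trans (ih x M 1 le_rfl) ?_
      apply max_le (le_max_left _ _)
      apply le_max_of_le_right
      simp only [List.length_cons]
      push_cast; omega

-- A's indexed fold over range(1, len L) equals pvScan on head/tail.
theorem pvFold_eq_scan (L : List Int) (a : Nat) (ha : 1 ≤ a) (hlen : a ≤ L.length)
    (st : Int × Int) :
    (PySem.List.pyRange (a : Int) (L.length : Int) 1).foldl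
      (fun (st : Int × Int) i =>
        if PySem.List.pyGetD L i 0 = PySem.List.pyGetD L (i - 1) 0 + 1 then
          (max st.1 (st.2 + 1), st.2 + 1)
        else (st.1, 1)) st
    = pvScan (L[a - 1]'(by omega)) (L.drop a) st := by
  by_cases h : a < L.length
  · rw [PySem.List.pyRange_one_cons (by exact_mod_cast h)]
    simp only [List.foldl_cons]
    have hget : PySem.List.pyGetD L (a : Int) 0 = L[a]'h := by
      rw [PySem.List.pyGetD_natCast, List.getD_eq_getElem?_getD, List.getElem?_eq_getElem h]
      rfl
    have hget' : PySem.List.pyGetD L ((a : Int) - 1) 0 = L[a - 1]'(by omega) := by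
      rw [show ((a : Int) - 1) = ((a - 1 : Nat) : Int) by omega, PySem.List.pyGetD_natCast,
        List.getD_eq_getElem?_getD, List.getElem?_eq_getElem (show a - 1 < L.length by omega)]
      rfl
    rw [hget, hget']
    have hrec := pvFold_eq_scan L (a + 1) (by omega) (by omega)
      (if L[a]'h = L[a - 1]'(by omega) + 1 then
        (max st.1 (st.2 + 1), st.2 + 1) else (st.1, 1))
    rw [show ((a : Int) + 1) = ((a + 1 : Nat) : Int) by omega, hrec,
      List.drop_eq_getElem_cons h]
    simp only [pvScan, Nat.add_sub_cancel]
  · have hae : a = L.length := by omega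
    rw [PySem.List.pyRange_one_eq_nil (by omega)]
    rw [show L.drop a = [] by simp [hae]]
    simp [pvScan]
termination_by L.length - a

-- Soundness: the final max witnesses a descending run inside any superset S of the scanned data.
theorem pvScan_sound (S : List Int) (p : Int) (t : List Int) (M c : Int)
    (hc1 : 1 ≤ c)
    (hc : ∀ j : Int, 0 ≤ j → j < c → p - j ∈ S)
    (hM : ∃ e, ∀ j : Int, 0 ≤ j → j < M → e - j ∈ S)
    (ht : ∀ x ∈ t, x ∈ S) :
    ∃ e, ∀ j : Int, 0 ≤ j → j < (pvScan p t (M, c)).1 → e - j ∈ S := by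
  induction t generalizing p M c with
  | nil => exact hM
  | cons x xs ih =>
    simp only [pvScan]
    have hxS : x ∈ S := ht x (by simp)
    have hts : ∀ y ∈ xs, y ∈ S := fun y hy => ht y (by simp [hy])
    by_cases hx : x = p + 1
    · rw [if_pos hx]
      have hxrun : ∀ j : Int, 0 ≤ j → j < c + 1 → x - j ∈ S := by
        intro j hj0 hjc
        by_cases hj : j = 0
        · simpa [hj] using hxS
        · have hp := hc (j - 1) (by omega) (by omega)
          have heq : x - j = p - (j - 1) := by omega
          rw [heq]; exact hp
      refine ih x (max M (c + 1)) (c + 1) (by omega) hxrun ?_ hts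
      rcases le_total (c + 1) M with hle | hle
      · rw [max_eq_left hle]; exact hM
      · rw [max_eq_right hle]; exact ⟨x, hxrun⟩
    · rw [if_neg hx]
      refine ih x M 1 le_rfl ?_ hM hts
      intro j hj0 hjc
      have hj : j = 0 := by omega
      simpa [hj] using hxS

-- Completeness: if d..d+m all lie in the strictly sorted p::t, the final max reaches m+1.
theorem pvScan_complete (p : Int) (t : List Int) (M c d m : Int)
    (hm : 0 ≤ m)
    (hsorted : (p :: t).Pairwise (· < ·))
    (hd : ∀ k : Int, 0 ≤ k → k ≤ m → p < d + k → d + k ∈ t)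
    (hc : d ≤ p → p ≤ d + m → p - d + 1 ≤ c)
    (hc1 : 1 ≤ c)
    (hM : d + m ≤ p → m + 1 ≤ M)
    (hM1 : 1 ≤ M) :
    m + 1 ≤ (pvScan p t (M, c)).1 := by
  induction t generalizing p M c with
  | nil =>
    have hend : d + m ≤ p := by
      by_contra hlt
      have := hd m hm le_rfl (by omega)
      simp at this
    simpa [pvScan] using hM hend
  | cons x xs ih =>
    have hpx : p < x := (List.pairwise_cons.mp hsorted).1 x (by simp)
    have hxlt : ∀ y ∈ xs, x < y := fun y hy =>
      (List.pairwise_cons.mp ((List.pairwise_cons.mp hsorted).2)).1 y hy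
    simp only [pvScan]
    have hsorted' : (x :: xs).Pairwise (· < ·) := (List.pairwise_cons.mp hsorted).2
    have hd' : ∀ k : Int, 0 ≤ k → k ≤ m → x < d + k → d + k ∈ xs := by
      intro k hk0 hkm hxk
      rcases List.mem_cons.mp (hd k hk0 hkm (by omega)) with h | h
      · omega
      · exact h
    -- any element of the run strictly below x has already been consumed (is ≤ p)
    have hrun_adj : ∀ z : Int, d ≤ z → z ≤ d + m → z < x → z ≤ p := by
      intro z hz1 hz2 hz3
      by_contra hzp
      have hzmem := hd (z - d) (by omega) (by omega) (by omega)
      rw [show d + (z - d) = z by omega] at hzmem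
      rcases List.mem_cons.mp hzmem with h | h
      · omega
      · exact absurd (hxlt z h) (by omega)
    by_cases hx : x = p + 1
    · rw [if_pos hx]
      have hMmax : M ≤ max M (c + 1) := le_max_left _ _
      have hcmax : c + 1 ≤ max M (c + 1) := le_max_right _ _
      refine ih x (max M (c + 1)) (c + 1) hsorted' hd' ?_ (by omega) ?_ (by omega)
      · intro hdx hxm
        by_cases hdp : d ≤ p
        · have := hc hdp (by omega); omega
        · omega
      · intro hdmx
        rcases lt_or_eq_of_le hdmx with h | h
        · have hdp : d + m ≤ p := hrun_adj (d + m) (by omega) le_rfl (by omega)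
          have := hM hdp; omega
        · by_cases hm0 : m = 0
          · omega
          · have hdp : d ≤ p := by
              have := hrun_adj d le_rfl (by omega) (by omega); omega
            have := hc hdp (by omega); omega
    · rw [if_neg hx]
      refine ih x M 1 hsorted' hd' ?_ le_rfl ?_ hM1
      · intro hdx hxm
        rcases lt_or_eq_of_le hdx with h | h
        · have := hrun_adj (x - 1) (by omega) (by omega) (by omega)
          omega
        · omega
      · intro hdmx
        rcases lt_or_eq_of_le hdmx with h | h
        · exact hM (hrun_adj (d + m) (by omega) le_rfl (by omega))
        · by_cases hm0 : m = 0
          · omega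
          · have := hrun_adj (x - 1) (by omega) (by omega) (by omega)
            omega

theorem pv_add_ofList_append (xs : List Int) (w : Int) :
    PySem.Set.add (PySem.Set.ofList xs) w = PySem.Set.ofList (xs ++ [w]) := by
  simp [PySem.Set.ofList_eq_foldl, List.foldl_append]

-- ===== VERDICT (by name: the statement is the Claim_ definition above) =====
theorem would_exceed_consecutive_py_spec : Claim_equal_would_exceed_consecutive_py := by
  intro emp_id weekday days_assigned m _
  unfold Spec_would_exceed_consecutive_py would_exceed_consecutive_py would_exceed_consecutive_py_alt
  simp only []
  set S := PySem.Set.add (PySem.Set.ofList (PySem.Dict.getD (PySem.Dict.mk days_assigned) emp_id [])) weekday with hSdef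
  have hwS : weekday ∈ S := by
    rw [hSdef]; exact (PySem.Set.mem_add _ _ _).mpr (Or.inr rfl)
  have hSne : S ≠ [] := List.ne_nil_of_mem hwS
  rw [if_neg (by simpa [List.isEmpty_iff] using hSne)]
  set L := PySem.List.sorted S (fun x => x) false with hLdef
  have hLmem : ∀ y : Int, y ∈ L ↔ y ∈ S := fun y => PySem.List.mem_sorted S _ false y
  have hLpair : L.Pairwise (· < ·) := by
    rw [hLdef, hSdef, pv_add_ofList_append]
    exact PySem.List.sorted_ofList_pairwise_lt _
  have hLne : L ≠ [] := by
    rw [hLdef]; simpa [PySem.List.sorted_eq_nil_iff] using hSne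
  obtain ⟨p, t, hLpt⟩ : ∃ p t, L = p :: t := by
    cases hL : L with
    | nil => exact absurd hL hLne
    | cons a b => exact ⟨a, b, rfl⟩
  have hfold := pvFold_eq_scan L 1 le_rfl (by rw [hLpt]; simp) (1, 1)
  rw [show ((1 : Nat) : Int) = 1 by norm_num] at hfold
  rw [hfold]
  have hhead : L[1 - 1]'(by rw [hLpt]; simp) = p := by simp [hLpt]
  have hdrop : L.drop 1 = t := by simp [hLpt]
  rw [hhead, hdrop]
  set M' := (pvScan p t (1, 1)).1 with hM'def
  have hM'1 : (1 : Int) ≤ M' := pvScan_fst_ge p t (1, 1)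
  have hlenLS : L.length = S.length := (PySem.List.sorted_perm S _ false).length_eq
  have hM'le : M' ≤ (S.length : Int) := by
    refine le_trans (pvScan_fst_le p t 1 1 le_rfl) ?_
    have : (1 : Int) + t.length = L.length := by rw [hLpt]; push_cast [List.length_cons]; omega
    rw [← hlenLS, ← this]
    apply max_le <;> omega
  have hpmin : ∀ y ∈ L, p ≤ y := by
    intro y hy
    rw [hLpt] at hy
    rcases List.mem_cons.mp hy with hy | hy
    · exact le_of_eq hy.symm
    · exact le_of_lt ((List.pairwise_cons.mp (hLpt ▸ hLpair)).1 y hy)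
  have hpS : p ∈ S := (hLmem p).mp (by rw [hLpt]; simp)
  -- the common characterisation
  have key : m < M' ↔ (∃ d ∈ S, ∀ k : Int, 1 ≤ k → k < m + 1 → d + k ∈ S) := by
    rcases lt_or_ge m 0 with hm | hm
    · constructor
      · intro _; exact ⟨p, hpS, fun k hk1 hk2 => absurd hk2 (by omega)⟩
      · intro _; omega
    · constructor
      · intro hlt
        obtain ⟨e, he⟩ := pvScan_sound S p t 1 1 le_rfl
          (fun j hj0 hj1 => by rw [show p - j = p by omega]; exact hpS)
          ⟨p, fun j hj0 hj1 => by rw [show p - j = p by omega]; exact hpS⟩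
          (fun x hx => (hLmem x).mp (by rw [hLpt]; simp [hx]))
        refine ⟨e - m, ?_, ?_⟩
        · have := he m hm (by omega)
          simpa using this
        · intro k hk1 hk2
          have := he (m - k) (by omega) (by omega)
          rw [show e - m + k = e - (m - k) by omega]
          exact this
      · rintro ⟨d, hdS, hrun⟩
        have hdL : d ∈ L := (hLmem d).mpr hdS
        have hrunS : ∀ k : Int, 0 ≤ k → k ≤ m → d + k ∈ S := by
          intro k hk0 hkm
          by_cases hk : k = 0
          · simpa [hk] using hdS
          · exact hrun k (by omega) (by omega)
        have hpd : p ≤ d := hpmin d hdL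
        have := pvScan_complete p t 1 1 d m hm (hLpt ▸ hLpair)
          (fun k hk0 hkm hpk => by
            have hmem : d + k ∈ L := (hLmem _).mpr (hrunS k hk0 hkm)
            rw [hLpt] at hmem
            rcases List.mem_cons.mp hmem with h | h
            · omega
            · exact h)
          (fun hdp _ => by omega)
          le_rfl
          (fun hdmp => by omega)
          le_rfl
        omega
  -- conclude the Bool equality
  by_cases hguard : PySem.Set.len S ≤ m
  · rw [if_pos hguard]
    apply decide_eq_false
    have : (S.length : Int) ≤ m := hguard
    omega
  rw [if_neg hguard]
  by_cases hB : (S.any fun d => (PySem.List.pyRange 1 (m + 1) 1).all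
      fun k => PySem.Set.contains S (d + k)) = true
  · rw [hB]
    apply decide_eq_true
    rw [List.any_eq_true] at hB
    obtain ⟨d, hdS, hall⟩ := hB
    rw [List.all_eq_true] at hall
    exact key.mpr ⟨d, hdS, fun k hk1 hk2 =>
      (PySem.Set.contains_iff S (d + k)).mp
        (hall k (PySem.List.mem_pyRange_one.mpr ⟨hk1, hk2⟩))⟩
  · rw [Bool.not_eq_true] at hB
    rw [hB]
    apply decide_eq_false
    intro hlt
    obtain ⟨d, hdS, hrun⟩ := key.mp hlt
    apply absurd _ (hB ▸ (Bool.false_ne_true))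
    rw [List.any_eq_true]
    refine ⟨d, hdS, ?_⟩
    rw [List.all_eq_true]
    intro k hk
    have hk' := PySem.List.mem_pyRange_one.mp hk
    exact (PySem.Set.contains_iff S (d + k)).mpr (hrun k hk'.1 hk'.2)
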